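-- pv_equiv track=rewrite | github.com/Mrkbil/Artificial-Intelligence | Hill Climbing 2.py | State_generate
-- ===== SOURCE A (Python) =====
-- def cal_cost(arr):
--     n=len(arr)
--     c = 0
--     for i in range(n):
--         for j in range(i + 1, n):
--             if arr[j] < arr[i]:
--                 c += 1
--     return c
--
-- def State_generate(list):
--     n=len(list)
--     cost = cal_cost(list)
--     arr = list.copy()
--     for i in range(n):
--         for j in range(i + 1, n):
--             tmp = list.copy()
--             temp = tmp[i]
--             tmp[i] = tmp[j]
--             tmp[j] = temp
--             tmp_cost = cal_cost(tmp)
--             if tmp_cost < cost: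
--                 cost = tmp_cost
--                 arr = tmp.copy()
--     return arr, cost
-- ===== SOURCE B (Python) =====
-- def State_generate(list):
--     n = len(list)
--     # base inversion count, computed once
--     cost0 = 0
--     for i in range(n):
--         for j in range(i + 1, n):
--             if list[j] < list[i]:
--                 cost0 += 1
--     # best swap via O(n) incremental delta per pair (no tmp copies, no recount)
--     best_i, best_j, best_cost = -1, -1, cost0
--     for i in range(n):
--         a = list[i]
--         for j in range(i + 1, n):
--             b = list[j]
--             delta = (1 if a < b else 0) - (1 if b < a else 0)
--             for k in range(i + 1, j):
--                 c = list[k]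
--                 delta += ((1 if c < b else 0) - (1 if c < a else 0)
--                           + (1 if a < c else 0) - (1 if b < c else 0))
--             if cost0 + delta < best_cost:
--                 best_cost = cost0 + delta
--                 best_i, best_j = i, j
--     if best_i < 0:
--         return list.copy(), cost0
--     arr = list.copy()
--     arr[best_i], arr[best_j] = arr[best_j], arr[best_i]
--     return arr, best_cost
-- ===== Notes on version B (the rewrite author's own statement) =====
-- stated objective: faster
-- what changed: B computes the inversion count once and evaluates each candidate swap by an O(n) incremental delta over the elements strictly between the swapped positions (no temporary list copies, no O(n^2) recount per pair), materialising the best swapped list only once at the end.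
import Mathlib
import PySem

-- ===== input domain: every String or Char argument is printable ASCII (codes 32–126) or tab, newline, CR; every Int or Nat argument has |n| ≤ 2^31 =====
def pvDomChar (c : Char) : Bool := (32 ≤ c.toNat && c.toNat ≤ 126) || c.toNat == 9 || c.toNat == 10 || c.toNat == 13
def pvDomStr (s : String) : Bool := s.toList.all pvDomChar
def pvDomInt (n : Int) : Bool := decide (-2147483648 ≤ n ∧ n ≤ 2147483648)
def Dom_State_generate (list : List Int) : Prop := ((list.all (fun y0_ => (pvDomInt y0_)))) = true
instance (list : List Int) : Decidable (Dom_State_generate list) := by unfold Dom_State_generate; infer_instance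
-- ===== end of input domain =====

-- B replaces A's per-swap list copy + full O(n^2) inversion recount by a single base count
-- plus an O(n) incremental delta per candidate swap (objective: faster, asymptotic).


-- ===== PORT A =====
-- indices produced by pyRange are always in range, so pyGetD/pySetD are exact here
def calCost (arr : List Int) : Int :=
  let n : Int := PySem.List.len arr
  (PySem.List.pyRange 0 n 1).foldl (fun c i =>
    (PySem.List.pyRange (i + 1) n 1).foldl (fun c j =>
      if PySem.List.pyGetD arr j 0 < PySem.List.pyGetD arr i 0 then c + 1 else c) c) 0

def State_generate (list : List Int) : List Int × Int :=
  let n : Int := PySem.List.len list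
  let cost := calCost list
  let arr := list
  (PySem.List.pyRange 0 n 1).foldl (fun s i =>
    (PySem.List.pyRange (i + 1) n 1).foldl (fun s j =>
      let tmp := list
      let temp := PySem.List.pyGetD tmp i 0
      let tmp := PySem.List.pySetD tmp i (PySem.List.pyGetD tmp j 0)
      let tmp := PySem.List.pySetD tmp j temp
      let tmpCost := calCost tmp
      if tmpCost < s.2 then (tmp, tmpCost) else s) s) (arr, cost)

-- ===== PORT B =====
def State_generate_alt (list : List Int) : List Int × Int :=
  let n : Int := PySem.List.len list
  -- base inversion count, computed once
  let cost0 : Int := (PySem.List.pyRange 0 n 1).foldl (fun c i =>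
    (PySem.List.pyRange (i + 1) n 1).foldl (fun c j =>
      if PySem.List.pyGetD list j 0 < PySem.List.pyGetD list i 0 then c + 1 else c) c) 0
  -- best swap via O(n) incremental delta per pair
  let st : Int × Int × Int := (PySem.List.pyRange 0 n 1).foldl (fun s i =>
    let a := PySem.List.pyGetD list i 0
    (PySem.List.pyRange (i + 1) n 1).foldl (fun s j =>
      let b := PySem.List.pyGetD list j 0
      let delta0 : Int := (if a < b then 1 else 0) - (if b < a then 1 else 0)
      let delta := (PySem.List.pyRange (i + 1) j 1).foldl (fun d k =>
        let c := PySem.List.pyGetD list k 0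
        d + ((if c < b then 1 else 0) - (if c < a then 1 else 0)
             + (if a < c then 1 else 0) - (if b < c then 1 else 0))) delta0
      if cost0 + delta < s.2.2 then (i, j, cost0 + delta) else s) s) (-1, -1, cost0)
  if st.1 < 0 then (list, cost0)
  else
    (PySem.List.pySetD (PySem.List.pySetD list st.1 (PySem.List.pyGetD list st.2.1 0))
       st.2.1 (PySem.List.pyGetD list st.1 0), st.2.2)

-- ===== PRECONDITION & SPEC =====
def Spec_State_generate (list : List Int) (out : List Int × Int) : Prop := out = State_generate_alt list
instance (list : List Int) (out : List Int × Int) : Decidable (Spec_State_generate list out) := by unfold Spec_State_generate; infer_instance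

-- ===== CLAIM (what is proved, stated in full; the proofs are below) =====
def Claim_equal_State_generate : Prop := ∀ (list : List Int), Dom_State_generate list → Spec_State_generate list (State_generate list)

-- ===== LEMMAS AND PROOFS =====

def pvInd (P : Prop) [Decidable P] : Int := if P then 1 else 0
def pvS (f : Nat → Int) (n : Nat) : Int :=
  ∑ p ∈ Finset.range n, ∑ q ∈ Finset.Ico (p + 1) n, pvInd (f q < f p)

theorem pvMemSwap (n i j : ℕ) (hi : i < n) (hj : j < n) (a : ℕ) :
    a ∈ Finset.range n ↔ Equiv.swap i j a ∈ Finset.range n := by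
  rcases eq_or_ne a i with rfl|hai
  · simp [Equiv.swap_apply_left, Finset.mem_range, hi, hj]
  rcases eq_or_ne a j with rfl|haj
  · simp [Equiv.swap_apply_right, Finset.mem_range, hi, hj]
  · rw [Equiv.swap_apply_of_ne_of_ne hai haj]

theorem pvSumSwap (n i j : ℕ) (hi : i < n) (hj : j < n) (g : ℕ → ℤ) :
    ∑ q ∈ Finset.range n, g (Equiv.swap i j q) = ∑ q ∈ Finset.range n, g q :=
  Finset.sum_equiv (Equiv.swap i j) (pvMemSwap n i j hi hj) (fun _ _ => rfl)

theorem pvFilterIco (a b n : ℕ) (hb : b ≤ n) (g : ℕ → ℤ) :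
    (∑ q ∈ Finset.range n, if a < q ∧ q < b then g q else 0) = ∑ q ∈ Finset.Ico (a+1) b, g q := by
  rw [← Finset.sum_filter]
  congr 1
  ext q; simp [Finset.mem_filter, Finset.mem_Ico, Finset.mem_range]; omega

theorem pvS_double (f : ℕ → ℤ) (n : ℕ) :
    pvS f n = ∑ p ∈ Finset.range n, ∑ q ∈ Finset.range n, (if p < q then pvInd (f q < f p) else 0) := by
  unfold pvS
  refine Finset.sum_congr rfl (fun p hp => ?_)
  rw [show (∑ q ∈ Finset.range n, if p < q then pvInd (f q < f p) else 0)
      = ∑ q ∈ Finset.range n, if p < q ∧ q < n then pvInd (f q < f p) else 0 from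
    Finset.sum_congr rfl (fun q hq => by
      simp only [Finset.mem_range] at hq
      simp [hq])]
  rw [pvFilterIco p n n le_rfl]


theorem pvSumIteSwap (n i j t : ℕ) (hi : i < n) (hj : j < n) (X : ℕ → ℤ) :
    (∑ q ∈ Finset.range n, if t < Equiv.swap i j q then X q else 0)
      = ∑ q ∈ Finset.range n, if t < q then X (Equiv.swap i j q) else 0 := by
  have h := pvSumSwap n i j hi hj (fun q => if t < q then X (Equiv.swap i j q) else 0)
  simpa [Equiv.swap_apply_self] using h

theorem pvDelta (f : Nat → Int) (n i j : Nat) (hij : i < j) (hj : j < n) :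
    pvS (fun p => f (Equiv.swap i j p)) n =
      pvS f n + ((pvInd (f i < f j) - pvInd (f j < f i))
        + ∑ k ∈ Finset.Ico (i + 1) j,
            (pvInd (f k < f j) - pvInd (f k < f i) + pvInd (f i < f k) - pvInd (f j < f k))) := by
  have hi : i < n := hij.trans hj
  have hσne : ∀ a, a ≠ i → a ≠ j → Equiv.swap i j a = a :=
    fun a h1 h2 => Equiv.swap_apply_of_ne_of_ne h1 h2
  -- step 1: the swapped pvS after reindexing both sums by the involution
  have hstep1 : pvS (fun p => f (Equiv.swap i j p)) n
      = ∑ p ∈ Finset.range n, ∑ q ∈ Finset.range n,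
          (if Equiv.swap i j p < Equiv.swap i j q then pvInd (f q < f p) else 0) := by
    rw [pvS_double]
    rw [← pvSumSwap n i j hi hj (fun p => ∑ q ∈ Finset.range n,
          (if Equiv.swap i j p < Equiv.swap i j q then pvInd (f q < f p) else 0))]
    refine Finset.sum_congr rfl (fun p _ => ?_)
    rw [← pvSumSwap n i j hi hj (fun q =>
          if Equiv.swap i j (Equiv.swap i j p) < Equiv.swap i j q then pvInd (f q < f (Equiv.swap i j p)) else 0)]
    refine Finset.sum_congr rfl (fun q _ => ?_)
    simp [Equiv.swap_apply_self]
  -- step 2: difference as a double sum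
  have hdiff : pvS (fun p => f (Equiv.swap i j p)) n - pvS f n
      = ∑ p ∈ Finset.range n, ∑ q ∈ Finset.range n,
          ((if Equiv.swap i j p < Equiv.swap i j q then pvInd (f q < f p) else 0)
            - (if p < q then pvInd (f q < f p) else 0)) := by
    rw [hstep1, pvS_double, ← Finset.sum_sub_distrib]
    refine Finset.sum_congr rfl (fun p _ => ?_)
    rw [← Finset.sum_sub_distrib]
  -- per-p inner sums
  have hDi : ∑ q ∈ Finset.range n,
        ((if Equiv.swap i j i < Equiv.swap i j q then pvInd (f q < f i) else 0)
          - (if i < q then pvInd (f q < f i) else 0))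
      = -(∑ k ∈ Finset.Ico (i+1) j, pvInd (f k < f i)) - pvInd (f j < f i) := by
    have h1 : (∑ q ∈ Finset.range n, if Equiv.swap i j i < Equiv.swap i j q then pvInd (f q < f i) else 0)
        = ∑ q ∈ Finset.range n, (if j < q then pvInd (f q < f i) else 0) := by
      rw [Equiv.swap_apply_left, pvSumIteSwap n i j j hi hj]
      refine Finset.sum_congr rfl (fun q _ => ?_)
      by_cases hq : j < q
      · rw [if_pos hq, if_pos hq, hσne q (by omega) (by omega)]
      · rw [if_neg hq, if_neg hq]
    rw [Finset.sum_sub_distrib, h1]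
    rw [← Finset.sum_sub_distrib]
    have h2 : ∀ q ∈ Finset.range n,
        ((if j < q then pvInd (f q < f i) else 0) - (if i < q then pvInd (f q < f i) else 0))
          = -(if i < q ∧ q < j + 1 then pvInd (f q < f i) else 0) := by
      intro q _
      split_ifs <;> first | (exfalso; omega) | ring
    rw [Finset.sum_congr rfl h2, Finset.sum_neg_distrib, pvFilterIco i (j+1) n (by omega)]
    rw [Finset.sum_Ico_succ_top (by omega)]
    ring
  have hDj : ∑ q ∈ Finset.range n,
        ((if Equiv.swap i j j < Equiv.swap i j q then pvInd (f q < f j) else 0)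
          - (if j < q then pvInd (f q < f j) else 0))
      = (∑ k ∈ Finset.Ico (i+1) j, pvInd (f k < f j)) + pvInd (f i < f j) := by
    have h1 : (∑ q ∈ Finset.range n, if Equiv.swap i j j < Equiv.swap i j q then pvInd (f q < f j) else 0)
        = ∑ q ∈ Finset.range n, (if i < q then pvInd (f (Equiv.swap i j q) < f j) else 0) := by
      rw [Equiv.swap_apply_right, pvSumIteSwap n i j i hi hj]
    rw [Finset.sum_sub_distrib, h1]
    have h2 : (∑ q ∈ Finset.range n, if i < q then pvInd (f (Equiv.swap i j q) < f j) else 0)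
        = ∑ q ∈ Finset.Ico (i+1) n, pvInd (f (Equiv.swap i j q) < f j) := by
      rw [show (∑ q ∈ Finset.range n, if i < q then pvInd (f (Equiv.swap i j q) < f j) else 0)
          = ∑ q ∈ Finset.range n, if i < q ∧ q < n then pvInd (f (Equiv.swap i j q) < f j) else 0 from
        Finset.sum_congr rfl (fun q hq => by
          simp only [Finset.mem_range] at hq
          simp [hq])]
      exact pvFilterIco i n n le_rfl _
    have h3 : (∑ q ∈ Finset.range n, if j < q then pvInd (f q < f j) else 0)
        = ∑ q ∈ Finset.Ico (j+1) n, pvInd (f q < f j) := by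
      rw [show (∑ q ∈ Finset.range n, if j < q then pvInd (f q < f j) else 0)
          = ∑ q ∈ Finset.range n, if j < q ∧ q < n then pvInd (f q < f j) else 0 from
        Finset.sum_congr rfl (fun q hq => by
          simp only [Finset.mem_range] at hq
          simp [hq])]
      exact pvFilterIco j n n le_rfl _
    rw [h2, h3]
    rw [← Finset.sum_Ico_consecutive (fun q => pvInd (f (Equiv.swap i j q) < f j)) (show i+1 ≤ j+1 by omega) (show j+1 ≤ n by omega)]
    have h4 : ∑ q ∈ Finset.Ico (j+1) n, pvInd (f (Equiv.swap i j q) < f j)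
        = ∑ q ∈ Finset.Ico (j+1) n, pvInd (f q < f j) := by
      refine Finset.sum_congr rfl (fun q hq => ?_)
      simp only [Finset.mem_Ico] at hq
      rw [hσne q (by omega) (by omega)]
    rw [h4]
    rw [Finset.sum_Ico_succ_top (show i+1 ≤ j by omega)]
    have h5 : ∑ q ∈ Finset.Ico (i+1) j, pvInd (f (Equiv.swap i j q) < f j)
        = ∑ q ∈ Finset.Ico (i+1) j, pvInd (f q < f j) := by
      refine Finset.sum_congr rfl (fun q hq => ?_)
      simp only [Finset.mem_Ico] at hq
      rw [hσne q (by omega) (by omega)]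
    rw [h5, Equiv.swap_apply_right]
    ring
  have hDo : ∀ p, p ∈ Finset.range n → p ≠ i → p ≠ j →
      ∑ q ∈ Finset.range n,
        ((if Equiv.swap i j p < Equiv.swap i j q then pvInd (f q < f p) else 0)
          - (if p < q then pvInd (f q < f p) else 0))
      = (if i < p ∧ p < j then pvInd (f i < f p) - pvInd (f j < f p) else 0) := by
    intro p hp hpi hpj
    have hσp : Equiv.swap i j p = p := hσne p hpi hpj
    have hpt : ∀ q ∈ Finset.range n,
        ((if Equiv.swap i j p < Equiv.swap i j q then pvInd (f q < f p) else 0)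
          - (if p < q then pvInd (f q < f p) else 0))
        = (if q = i then ((if p < j then pvInd (f i < f p) else 0) - (if p < i then pvInd (f i < f p) else 0)) else 0)
          + (if q = j then ((if p < i then pvInd (f j < f p) else 0) - (if p < j then pvInd (f j < f p) else 0)) else 0) := by
      intro q _
      by_cases hqi : q = i
      · subst hqi
        rw [hσp, Equiv.swap_apply_left, if_pos rfl, if_neg (Nat.ne_of_lt hij)]
        ring
      by_cases hqj : q = j
      · subst hqj
        rw [hσp, Equiv.swap_apply_right, if_neg (Nat.ne_of_gt hij), if_pos rfl]
        ring
      · rw [hσp, hσne q hqi hqj, if_neg hqi, if_neg hqj]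
        ring
    rw [Finset.sum_congr rfl hpt, Finset.sum_add_distrib, Finset.sum_ite_eq' (Finset.range n) i,
      Finset.sum_ite_eq' (Finset.range n) j, if_pos (Finset.mem_range.mpr hi), if_pos (Finset.mem_range.mpr hj)]
    have hne1 : p ≠ i := hpi
    have hne2 : p ≠ j := hpj
    split_ifs <;> first | (exfalso; omega) | ring
  -- assemble
  have hassemble : ∑ p ∈ Finset.range n, ∑ q ∈ Finset.range n,
        ((if Equiv.swap i j p < Equiv.swap i j q then pvInd (f q < f p) else 0)
          - (if p < q then pvInd (f q < f p) else 0))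
      = (-(∑ k ∈ Finset.Ico (i+1) j, pvInd (f k < f i)) - pvInd (f j < f i))
        + ((∑ k ∈ Finset.Ico (i+1) j, pvInd (f k < f j)) + pvInd (f i < f j))
        + ∑ k ∈ Finset.Ico (i+1) j, (pvInd (f i < f k) - pvInd (f j < f k)) := by
    have hchar : ∀ p ∈ Finset.range n,
        (∑ q ∈ Finset.range n,
          ((if Equiv.swap i j p < Equiv.swap i j q then pvInd (f q < f p) else 0)
            - (if p < q then pvInd (f q < f p) else 0)))
        = (if p = i then (-(∑ k ∈ Finset.Ico (i+1) j, pvInd (f k < f i)) - pvInd (f j < f i)) else 0)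
          + (if p = j then ((∑ k ∈ Finset.Ico (i+1) j, pvInd (f k < f j)) + pvInd (f i < f j)) else 0)
          + (if i < p ∧ p < j then pvInd (f i < f p) - pvInd (f j < f p) else 0) := by
      intro p hp
      rcases eq_or_ne p i with rfl|hpi
      · rw [if_pos rfl, if_neg (by omega), if_neg (by omega), hDi]; ring
      rcases eq_or_ne p j with rfl|hpj
      · rw [if_neg hpi, if_pos rfl, if_neg (by omega), hDj]; ring
      · rw [if_neg hpi, if_neg hpj, hDo p hp hpi hpj]; ring
    rw [Finset.sum_congr rfl hchar, Finset.sum_add_distrib, Finset.sum_add_distrib,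
      Finset.sum_ite_eq' (Finset.range n) i, Finset.sum_ite_eq' (Finset.range n) j,
      if_pos (Finset.mem_range.mpr hi), if_pos (Finset.mem_range.mpr hj),
      pvFilterIco i j n (by omega)]
  have hsplit1 : ∑ k ∈ Finset.Ico (i+1) j, (pvInd (f k < f j) - pvInd (f k < f i) + pvInd (f i < f k) - pvInd (f j < f k))
      = (((∑ k ∈ Finset.Ico (i+1) j, pvInd (f k < f j)) - ∑ k ∈ Finset.Ico (i+1) j, pvInd (f k < f i))
        + (∑ k ∈ Finset.Ico (i+1) j, pvInd (f i < f k))) - ∑ k ∈ Finset.Ico (i+1) j, pvInd (f j < f k) := by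
    rw [← Finset.sum_sub_distrib, ← Finset.sum_add_distrib, ← Finset.sum_sub_distrib]
  have hsplit2 : ∑ k ∈ Finset.Ico (i+1) j, (pvInd (f i < f k) - pvInd (f j < f k))
      = (∑ k ∈ Finset.Ico (i+1) j, pvInd (f i < f k)) - ∑ k ∈ Finset.Ico (i+1) j, pvInd (f j < f k) :=
    Finset.sum_sub_distrib _ _
  have h := hdiff.trans hassemble
  rw [hsplit2] at h
  rw [hsplit1]
  linarith [h]

theorem pvSwapGetD (x : List Int) (i j : Nat) (hij : i < j) (hj : j < x.length) (p : Nat) :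
    ((x.set i (x.getD j 0)).set j (x.getD i 0)).getD p 0 = x.getD (Equiv.swap i j p) 0 := by
  have hi : i < x.length := hij.trans hj
  by_cases hpi : p = i
  · subst hpi
    simp [List.getD_eq_getElem?_getD, Equiv.swap_apply_left, hj, hi,
      List.getElem_set_ne (hij.ne'), List.getElem_set_self]
  · by_cases hpj : p = j
    · subst hpj
      simp [List.getD_eq_getElem?_getD, Equiv.swap_apply_right, hj, hi, List.getElem_set_self]
    · simp [List.getD_eq_getElem?_getD, Equiv.swap_apply_of_ne_of_ne hpi hpj,
        (show j ≠ p from fun h => hpj h.symm), (show i ≠ p from fun h => hpi h.symm)]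

theorem pvSumListRange (m : Nat) (g : Nat → Int) :
    ((List.range m).map g).sum = ∑ p ∈ Finset.range m, g p := by
  induction m with
  | zero => simp
  | succ k ih => rw [List.range_succ, Finset.sum_range_succ, ← ih]; simp

-- a sum of Int-valued terms over a Python range, as a Finset sum
theorem pvSumPyRange (a b : Int) (ha : 0 ≤ a) (G : Int → Int) :
    ((PySem.List.pyRange a b 1).map G).sum = ∑ k ∈ Finset.Ico a.toNat b.toNat, G (k : Int) := by
  rw [PySem.List.pyRange_one, List.map_map, pvSumListRange, Finset.sum_Ico_eq_sum_range]
  have hlen : (b - a).toNat = b.toNat - a.toNat := by omega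
  rw [hlen]
  refine Finset.sum_congr rfl (fun k hk => ?_)
  have : a + (k : Int) = ((a.toNat + k : Nat) : Int) := by omega
  simp only [Function.comp, this]

theorem pvInnerCnt (x : List Int) (a b : Int) (v : Int) (c : Int) (ha : 0 ≤ a) :
    (PySem.List.pyRange a b 1).foldl (fun c j =>
        if PySem.List.pyGetD x j 0 < v then c + 1 else c) c
      = c + ∑ q ∈ Finset.Ico a.toNat b.toNat, pvInd (x.getD q 0 < v) := by
  rw [PySem.List.foldl_ite_add_one (fun j => PySem.List.pyGetD x j 0 < v)]
  congr 1
  rw [← PySem.List.sum_map_ite_one_zero, pvSumPyRange a b ha]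
  refine Finset.sum_congr rfl (fun k hk => ?_)
  simp only [PySem.List.pyGetD_natCast, pvInd]
  split <;> simp_all [List.getD_eq_getElem?_getD]

theorem pvCalCost_eq (x : List Int) :
    calCost x = pvS (fun p => x.getD p 0) x.length := by
  unfold calCost pvS
  simp only [PySem.List.len_eq, PySem.List.pyRange_zero_natCast, List.foldl_map]
  have hcongr : ∀ (c : Int), ∀ p ∈ List.range x.length,
      (PySem.List.pyRange ((p : Int) + 1) (x.length : Int) 1).foldl (fun c j =>
        if PySem.List.pyGetD x j 0 < PySem.List.pyGetD x (p : Int) 0 then c + 1 else c) c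
      = c + ∑ q ∈ Finset.Ico (p + 1) x.length, pvInd (x.getD q 0 < x.getD p 0) := by
    intro c p hp
    rw [pvInnerCnt x _ _ _ _ (by omega)]
    simp
  rw [PySem.List.foldl_congr_mem _ _
      (fun c p => c + ∑ q ∈ Finset.Ico (p + 1) x.length, pvInd (x.getD q 0 < x.getD p 0)) 0 hcongr]
  rw [PySem.List.foldl_add, pvSumListRange]
  simp

-- fold over a list with membership-restricted commuting step
theorem pvFoldlHomMem {α β γ : Type} (g : β → γ) (f : γ → α → γ) (f' : β → α → β)
    (l : List α) (b : β) (h : ∀ s x, x ∈ l → f (g s) x = g (f' s x)) :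
    l.foldl f (g b) = g (l.foldl f' b) := by
  induction l generalizing b with
  | nil => rfl
  | cons x xs ih =>
      simp only [List.foldl_cons]
      rw [h b x (by simp)]
      exact ih _ (fun s y hy => h s y (by simp [hy]))

theorem pvFoldlInv {α β : Type} (P : β → Prop) (f : β → α → β) (l : List α) (b : β)
    (hb : P b) (h : ∀ s x, x ∈ l → P s → P (f s x)) : P (l.foldl f b) := by
  induction l generalizing b with
  | nil => exact hb
  | cons x xs ih =>
      exact ih _ (h b x (by simp) hb) (fun s y hy => h s y (by simp [hy]))

-- the A-side state a B-side state (best_i, best_j, best_cost) represents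
def pvRepr (list : List Int) (s : Int × Int × Int) : List Int × Int :=
  (if s.1 < 0 then list
   else PySem.List.pySetD (PySem.List.pySetD list s.1 (PySem.List.pyGetD list s.2.1 0))
          s.2.1 (PySem.List.pyGetD list s.1 0), s.2.2)

-- the inversion count of the swapped list equals the base count plus B's incremental delta
theorem pvCost_swap (list : List Int) (i j : Int) (hi : 0 ≤ i) (hij : i < j)
    (hj : j < (list.length : Int)) :
    calCost (PySem.List.pySetD (PySem.List.pySetD list i (PySem.List.pyGetD list j 0))
        j (PySem.List.pyGetD list i 0))
      = calCost list +
        ((PySem.List.pyRange (i + 1) j 1).foldl (fun d k =>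
            d + ((if PySem.List.pyGetD list k 0 < PySem.List.pyGetD list j 0 then 1 else 0)
               - (if PySem.List.pyGetD list k 0 < PySem.List.pyGetD list i 0 then 1 else 0)
               + (if PySem.List.pyGetD list i 0 < PySem.List.pyGetD list k 0 then 1 else 0)
               - (if PySem.List.pyGetD list j 0 < PySem.List.pyGetD list k 0 then 1 else 0)))
          ((if PySem.List.pyGetD list i 0 < PySem.List.pyGetD list j 0 then 1 else 0)
            - (if PySem.List.pyGetD list j 0 < PySem.List.pyGetD list i 0 then 1 else 0))) := by
  obtain ⟨I, rfl⟩ : ∃ I : Nat, i = (I : Int) := ⟨i.toNat, by omega⟩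
  obtain ⟨J, rfl⟩ : ∃ J : Nat, j = (J : Int) := ⟨j.toNat, by omega⟩
  have hIJ : I < J := by exact_mod_cast hij
  have hJ : J < list.length := by exact_mod_cast hj
  simp only [PySem.List.pyGetD_natCast, PySem.List.pySetD_natCast]
  -- left side: inversion count of the swapped list, via pvDelta
  rw [pvCalCost_eq, pvCalCost_eq]
  have hlen : ((list.set I (list.getD J 0)).set J (list.getD I 0)).length = list.length := by simp
  rw [hlen]
  have hfun : (fun p => ((list.set I (list.getD J 0)).set J (list.getD I 0)).getD p 0)
      = fun p => list.getD (Equiv.swap I J p) 0 := funext (pvSwapGetD list I J hIJ hJ)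
  rw [hfun, pvDelta (fun p => list.getD p 0) list.length I J hIJ hJ]
  -- right side: B's delta fold as a Finset sum
  rw [PySem.List.foldl_add, pvSumPyRange _ _ (by omega)]
  have hIto : ((I : Int) + 1).toNat = I + 1 := by omega
  have hJto : ((J : Int) : Int).toNat = J := by omega
  rw [hIto, show ((J : Int)).toNat = J from by omega]
  simp only [PySem.List.pyGetD_natCast, pvInd]

theorem pvStep (list : List Int) (i j v : Int) (hi0 : 0 ≤ i) (s : Int × Int × Int) :
    (if v < (pvRepr list s).2
        then (PySem.List.pySetD (PySem.List.pySetD list i (PySem.List.pyGetD list j 0)) j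
                (PySem.List.pyGetD list i 0), v)
        else pvRepr list s)
    = pvRepr list (if v < s.2.2 then (i, j, v) else s) := by
  have h2 : (pvRepr list s).2 = s.2.2 := rfl
  rw [h2]
  by_cases hlt : v < s.2.2
  · rw [if_pos hlt, if_pos hlt]
    simp [pvRepr, not_lt.mpr hi0]
  · rw [if_neg hlt, if_neg hlt]

theorem pvReprFinal (list : List Int) (st : Int × Int × Int)
    (h : st.1 < 0 → st.2.2 = calCost list) :
    pvRepr list st =
      if st.1 < 0 then (list, calCost list)
      else (PySem.List.pySetD (PySem.List.pySetD list st.1 (PySem.List.pyGetD list st.2.1 0))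
              st.2.1 (PySem.List.pyGetD list st.1 0), st.2.2) := by
  unfold pvRepr
  by_cases hlt : st.1 < 0
  · rw [if_pos hlt, if_pos hlt, h hlt]
  · rw [if_neg hlt, if_neg hlt]

-- ===== VERDICT (by name: the statement is the Claim_ definition above) =====
theorem State_generate_spec : Claim_equal_State_generate := by
  intro list _
  unfold Spec_State_generate
  simp only [State_generate, State_generate_alt]
  have hc0 : ((PySem.List.pyRange 0 (PySem.List.len list) 1).foldl (fun c i =>
      (PySem.List.pyRange (i + 1) (PySem.List.len list) 1).foldl (fun c j =>
        if PySem.List.pyGetD list j 0 < PySem.List.pyGetD list i 0 then c + 1 else c) c) 0)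
      = calCost list := rfl
  simp only [hc0]
  rw [show ((list, calCost list) : List Int × Int) = pvRepr list (-1, -1, calCost list) from by
    simp [pvRepr]]
  refine (pvFoldlHomMem (pvRepr list) _ _ _ _ ?_).trans (pvReprFinal list _ ?_)
  · -- the two nested loops track related states
    intro s i hi
    rw [PySem.List.mem_pyRange_one] at hi
    refine pvFoldlHomMem (pvRepr list) _ _ _ _ ?_
    intro s' j hj
    rw [PySem.List.mem_pyRange_one, PySem.List.len_eq] at hj
    rw [pvCost_swap list i j (by omega) (by omega) (by omega)]
    exact pvStep list i j _ (by omega) s'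
  · -- invariant: while best_i < 0 the best cost is still the base cost
    refine pvFoldlInv (fun s : Int × Int × Int => s.1 < 0 → s.2.2 = calCost list) _ _ _ (fun _ => rfl) ?_
    intro s i hi hP
    rw [PySem.List.mem_pyRange_one] at hi
    refine pvFoldlInv (fun s : Int × Int × Int => s.1 < 0 → s.2.2 = calCost list) _ _ _ hP ?_
    intro s' j hj hP'
    split_ifs <;> try exact hP'
    all_goals
      intro hneg
      have : i < 0 := hneg
      omega
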